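-- pv_equiv track=rewrite | github.com/rahul-saini-io/dsa | strings/generate_document.py | generate_doc
-- ===== SOURCE A (Python) =====
-- def generate_doc(chars, doc):
--     """
--         Check if we can use chars to make our document
--         chars string can have duplicate chars which is not a problem
--         we just have to make sure that chars in chars string adds up to make document string spaces, symbol included.
--
--     """
--
--     f_map = {}
--     for ch in chars:
--         if ch in f_map:
--             f_map[ch] += 1
--         else:
--             f_map[ch] = 1
--
--     for ch in doc:
--         if ch not in f_map or f_map[ch] == 0:
--             return False
--         else:
--             f_map[ch] -= 1
--     return True
-- ===== SOURCE B (Python) =====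
-- def generate_doc(chars, doc):
--     have = {}
--     for ch in chars:
--         have[ch] = have.get(ch, 0) + 1
--     need = {}
--     for ch in doc:
--         need[ch] = need.get(ch, 0) + 1
--     return all(n <= have.get(ch, 0) for ch, n in need.items())
-- ===== Notes on version B (the rewrite author's own statement) =====
-- stated objective: simpler
-- what changed: Replaces the interleaved decrement-with-early-exit scan over doc by building two frequency tables (one per string) and comparing needed vs available counts in a single pass over doc's distinct characters.
import Mathlib
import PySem

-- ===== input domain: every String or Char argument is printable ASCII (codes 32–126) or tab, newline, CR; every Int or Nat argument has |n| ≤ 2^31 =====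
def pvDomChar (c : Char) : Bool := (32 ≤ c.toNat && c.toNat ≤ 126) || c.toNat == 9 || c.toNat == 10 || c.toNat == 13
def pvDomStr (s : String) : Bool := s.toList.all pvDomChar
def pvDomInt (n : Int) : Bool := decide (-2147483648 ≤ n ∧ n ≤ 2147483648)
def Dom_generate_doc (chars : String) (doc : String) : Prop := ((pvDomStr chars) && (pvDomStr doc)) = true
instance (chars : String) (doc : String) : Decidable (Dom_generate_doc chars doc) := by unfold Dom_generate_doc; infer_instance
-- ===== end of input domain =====

-- B builds two frequency tables and compares counts; A decrements one table over doc with early exit.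
-- Equal return value proved for all inputs; neither program mutates its arguments.

-- ===== PORT A =====
-- the second Python loop: walk doc, fail when the character is missing/exhausted, else decrement
def gdLoopA (d : PySem.Dict Char Int) : List Char → Bool
  | [] => true
  | ch :: rest =>
    if !d.contains ch || d.getD ch 0 == 0 then false
    else gdLoopA (d.insert ch (d.getD ch 0 - 1)) rest

def generate_doc (chars : String) (doc : String) : Bool :=
  let f_map := chars.toList.foldl
    (fun d ch => if d.contains ch then d.insert ch (d.getD ch 0 + 1) else d.insert ch 1)
    PySem.Dict.empty
  gdLoopA f_map doc.toList

-- ===== PORT B =====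
def generate_doc_alt (chars : String) (doc : String) : Bool :=
  let haveD := chars.toList.foldl (fun d ch => d.insert ch (d.getD ch 0 + 1)) (PySem.Dict.empty : PySem.Dict Char Int)
  let needD := doc.toList.foldl (fun d ch => d.insert ch (d.getD ch 0 + 1)) (PySem.Dict.empty : PySem.Dict Char Int)
  needD.items.all (fun p => p.2 ≤ haveD.getD p.1 0)

-- ===== PRECONDITION & SPEC =====
def Spec_generate_doc (chars : String) (doc : String) (out : Bool) : Prop := out = generate_doc_alt chars doc
instance (chars : String) (doc : String) (out : Bool) : Decidable (Spec_generate_doc chars doc out) := by unfold Spec_generate_doc; infer_instance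

-- ===== CLAIM (what is proved, stated in full; the proofs are below) =====
def Claim_equal_generate_doc : Prop := ∀ (chars : String) (doc : String), Dom_generate_doc chars doc → Spec_generate_doc chars doc (generate_doc chars doc)

-- ===== LEMMAS AND PROOFS =====

-- A's build loop produces exactly the counter of chars
theorem gd_build_eq_counter (cs : List Char) :
    cs.foldl (fun d ch => if d.contains ch then d.insert ch (d.getD ch 0 + 1) else d.insert ch 1)
      PySem.Dict.empty = PySem.Dict.counter cs := by
  rw [← PySem.Dict.foldl_insert_getD_add_one_eq_counter]
  apply PySem.List.foldl_congr_mem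
  intro d ch _
  by_cases h : d.contains ch = true
  · simp [h]
  · rw [if_neg h, PySem.Dict.getD_of_not_contains _ _ (by simpa using h)]
    norm_num

-- A's doc loop succeeds iff every remaining need fits in the table (table nonnegative)
theorem gdLoopA_iff (ds : List Char) (d : PySem.Dict Char Int)
    (hn : ∀ ch, 0 ≤ d.getD ch 0) :
    gdLoopA d ds = true ↔ ∀ ch, (ds.count ch : Int) ≤ d.getD ch 0 := by
  induction ds generalizing d with
  | nil => simp [gdLoopA, hn]
  | cons c rest ih =>
    have hz : (!d.contains c || d.getD c 0 == 0) = true ↔ d.getD c 0 = 0 := by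
      cases hcc : d.contains c
      · simp [PySem.Dict.getD_of_not_contains _ _ hcc]
      · simp
    by_cases h0 : d.getD c 0 = 0
    · rw [gdLoopA, if_pos (hz.mpr h0)]
      constructor
      · intro h; exact absurd h (by simp)
      · intro h
        have := h c
        simp [h0] at this
        omega
    · rw [gdLoopA, if_neg (by simp only [hz]; exact h0)]
      rw [ih _ (by
        intro ch
        rw [PySem.Dict.getD_insert]
        split_ifs with he
        · have := hn c; subst he; omega
        · exact hn ch)]
      constructor
      · intro h ch
        have := h ch
        rw [PySem.Dict.getD_insert] at this
        by_cases he : ch = c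
        · subst he; simp only [List.count_cons, beq_self_eq_true] at *
          push_cast at *; omega
        · rw [if_neg he] at this
          have hcc : ¬ c = ch := fun hh => he hh.symm
          simpa [List.count_cons, hcc] using this
      · intro h ch
        have := h ch
        rw [PySem.Dict.getD_insert]
        by_cases he : ch = c
        · subst he
          simp only [List.count_cons, beq_self_eq_true] at this
          push_cast at *; omega
        · rw [if_neg he]
          have hcc : ¬ c = ch := fun hh => he hh.symm
          simpa [List.count_cons, hcc] using this

-- B equals the pure counting condition
theorem gd_alt_iff (cs ds : List Char) :
    (PySem.Dict.counter ds).items.all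
        (fun p => p.2 ≤ (PySem.Dict.counter cs).getD p.1 0) = true ↔
    ∀ ch, (ds.count ch : Int) ≤ (cs.count ch : Int) := by
  rw [PySem.Dict.items_counter]
  simp only [List.all_map, List.all_eq_true, Function.comp]
  constructor
  · intro h ch
    by_cases hm : ch ∈ PySem.Set.ofList ds
    · have := h ch hm
      simpa [PySem.Dict.getD_counter] using this
    · have hz : ds.count ch = 0 := by
        rw [List.count_eq_zero]
        intro hmem
        exact hm ((PySem.Set.mem_ofList _ _).mpr hmem)
      simp [hz]
  · intro h ch _
    simpa [PySem.Dict.getD_counter] using h ch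

-- ===== VERDICT (by name: the statement is the Claim_ definition above) =====
theorem generate_doc_spec : Claim_equal_generate_doc := by
  intro chars doc _
  unfold Spec_generate_doc generate_doc generate_doc_alt
  simp only [gd_build_eq_counter]
  rw [PySem.Dict.foldl_insert_getD_add_one_eq_counter chars.toList,
      PySem.Dict.foldl_insert_getD_add_one_eq_counter doc.toList,
      Bool.eq_iff_iff]
  rw [gdLoopA_iff _ _ (fun ch => by rw [PySem.Dict.getD_counter]; positivity), gd_alt_iff]
  constructor
  · intro h ch; exact le_trans (h ch) (by rw [PySem.Dict.getD_counter])
  · intro h ch; rw [PySem.Dict.getD_counter]; exact h ch
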